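-- pv_equiv track=rewrite | github.com/LaurentSch/Bsp_rsa | src/find_matching_waves_v2.py | create_exponents
-- ===== SOURCE A (Python) =====
-- def create_exponents(partial_exponents):
--     """
--     Create all 4 variations of the winners right to left, RtL with swapped 0s and 1nes,
--     LtR, and LtR with swapped values
--     :param partial_exponents: List of found partial exponents
--     :return: List lists of all possible completed updated exponents
--     """
--     exponents = []
--     for partial in partial_exponents:
--         exponents.append([partial[0], partial[1], f"1{partial[2]}"])
--         exponents.append([partial[0], partial[1], f"1{''.join(['1' if bit == '0' else '0' for bit in partial[2]])}"])
--         exponents.append([partial[0], partial[1], f"{partial[2][::-1]}1"])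
--         exponents.append([partial[0], partial[1], f"{''.join(['1' if bit == '0' else '0' for bit in partial[2]])[::-1]}1"])
--     return exponents
-- ===== SOURCE B (Python) =====
-- def create_exponents(partial_exponents):
--     # Single fused character pass per partial: one loop over the bits builds all four
--     # final strings at once (append for the left-to-right ones, prepend for the
--     # reversed ones), instead of A's separate comprehensions and slice reversals.
--     exponents = []
--     for p in partial_exponents:
--         fwd, fwd_c, rev, rev_c = "1", "1", "1", "1"
--         for bit in p[2]:
--             flip = '1' if bit == '0' else '0'
--             fwd = fwd + bit      # "1" + bits
--             fwd_c = fwd_c + flip # "1" + complement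
--             rev = bit + rev      # bits reversed + "1"
--             rev_c = flip + rev_c # complement reversed + "1"
--         exponents += [[p[0], p[1], fwd], [p[0], p[1], fwd_c],
--                       [p[0], p[1], rev], [p[0], p[1], rev_c]]
--     return exponents
-- ===== Notes on version B (the rewrite author's own statement) =====
-- stated objective: alternative
-- what changed: Instead of four separate string constructions per partial (two complement comprehensions plus two slice reversals), B makes one fused pass over the bits maintaining four accumulators, building the two forward strings by appending and the two reversed strings by prepending.
import Mathlib
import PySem

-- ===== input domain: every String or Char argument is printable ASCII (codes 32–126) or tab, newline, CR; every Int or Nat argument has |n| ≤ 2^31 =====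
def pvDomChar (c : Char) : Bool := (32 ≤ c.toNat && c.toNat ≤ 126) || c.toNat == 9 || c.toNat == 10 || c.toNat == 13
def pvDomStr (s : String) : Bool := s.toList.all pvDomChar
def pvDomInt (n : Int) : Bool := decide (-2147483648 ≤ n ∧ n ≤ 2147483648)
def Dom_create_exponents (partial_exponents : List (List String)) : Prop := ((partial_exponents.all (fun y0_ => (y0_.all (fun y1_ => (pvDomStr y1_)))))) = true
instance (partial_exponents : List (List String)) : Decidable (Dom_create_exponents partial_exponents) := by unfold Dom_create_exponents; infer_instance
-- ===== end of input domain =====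

-- B builds all four per-partial strings in ONE fused pass over the bits (append / prepend
-- accumulators) instead of A's separate complement comprehensions and slice reversals (alternative).

-- ===== PORT A =====
-- A's per-character swap '1' if bit == '0' else '0' (the list comprehension inside ''.join)
def pvSwapBits (l : List Char) : List Char := l.map (fun bit => if bit = '0' then '1' else '0')

def create_exponents (partial_exponents : List (List String)) : List (List String) :=
  partial_exponents.foldl (fun exponents partial_ =>
    let p0 := (PySem.List.pyGet? partial_ 0).getD ""   -- in range under Pre_
    let p1 := (PySem.List.pyGet? partial_ 1).getD ""
    let p2 := ((PySem.List.pyGet? partial_ 2).getD "").toList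
    exponents
      ++ [[p0, p1, String.ofList ('1' :: p2)]]                              -- f"1{partial[2]}"
      ++ [[p0, p1, String.ofList ('1' :: pvSwapBits p2)]]
      ++ [[p0, p1, String.ofList (p2.reverse ++ ['1'])]]                    -- partial[2][::-1] + "1"
      ++ [[p0, p1, String.ofList ((pvSwapBits p2).reverse ++ ['1'])]]) []

-- ===== PORT B =====
def create_exponents_alt (partial_exponents : List (List String)) : List (List String) :=
  partial_exponents.foldl (fun exponents p =>
    let p0 := (PySem.List.pyGet? p 0).getD ""   -- in range under Pre_
    let p1 := (PySem.List.pyGet? p 1).getD ""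
    let bits := ((PySem.List.pyGet? p 2).getD "").toList
    -- one fused pass: (fwd, fwd_c, rev, rev_c)
    let st := bits.foldl (fun (s : List Char × List Char × List Char × List Char) bit =>
        let flip := if bit = '0' then '1' else '0'
        (s.1 ++ [bit], s.2.1 ++ [flip], bit :: s.2.2.1, flip :: s.2.2.2))
      (['1'], ['1'], ['1'], ['1'])
    exponents ++ [[p0, p1, String.ofList st.1], [p0, p1, String.ofList st.2.1],
                  [p0, p1, String.ofList st.2.2.1], [p0, p1, String.ofList st.2.2.2]]) []

-- ===== PRECONDITION & SPEC =====
-- A indexes partial[0], partial[1], partial[2]: it raises IndexError on any partial with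
-- fewer than 3 entries, so those inputs are excluded.
def Pre_create_exponents (partial_exponents : List (List String)) : Prop :=
  ∀ p ∈ partial_exponents, 3 ≤ p.length
instance (partial_exponents : List (List String)) : Decidable (Pre_create_exponents partial_exponents) := by unfold Pre_create_exponents; infer_instance

def pvWitness_create_exponents : List (List String) := [["3", "5", "0110"]]

def Spec_create_exponents (partial_exponents : List (List String)) (out : List (List String)) : Prop := out = create_exponents_alt partial_exponents
instance (partial_exponents : List (List String)) (out : List (List String)) : Decidable (Spec_create_exponents partial_exponents out) := by unfold Spec_create_exponents; infer_instance

-- ===== CLAIM (what is proved, stated in full; the proofs are below) =====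
def Claim_equal_create_exponents : Prop := ∀ (partial_exponents : List (List String)), Dom_create_exponents partial_exponents → Pre_create_exponents partial_exponents → Spec_create_exponents partial_exponents (create_exponents partial_exponents)

-- ===== LEMMAS AND PROOFS =====
-- the fused inner pass computes the four strings of A
theorem fused_pass_eq (l : List Char) (a b c d : List Char) :
    l.foldl (fun (s : List Char × List Char × List Char × List Char) bit =>
        let flip := if bit = '0' then '1' else '0'
        (s.1 ++ [bit], s.2.1 ++ [flip], bit :: s.2.2.1, flip :: s.2.2.2)) (a, b, c, d)
    = (a ++ l, b ++ pvSwapBits l, l.reverse ++ c, (pvSwapBits l).reverse ++ d) := by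
  induction l generalizing a b c d with
  | nil => simp [pvSwapBits]
  | cons h t ih => simp [List.foldl_cons, ih, pvSwapBits]

-- the two folds produce the same rows, for any accumulator
theorem create_exponents_blocks_eq (l : List (List String)) (acc : List (List String)) :
    l.foldl (fun exponents partial_ =>
      let p0 := (PySem.List.pyGet? partial_ 0).getD ""
      let p1 := (PySem.List.pyGet? partial_ 1).getD ""
      let p2 := ((PySem.List.pyGet? partial_ 2).getD "").toList
      exponents
        ++ [[p0, p1, String.ofList ('1' :: p2)]]
        ++ [[p0, p1, String.ofList ('1' :: pvSwapBits p2)]]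
        ++ [[p0, p1, String.ofList (p2.reverse ++ ['1'])]]
        ++ [[p0, p1, String.ofList ((pvSwapBits p2).reverse ++ ['1'])]]) acc
    = l.foldl (fun exponents p =>
      let p0 := (PySem.List.pyGet? p 0).getD ""
      let p1 := (PySem.List.pyGet? p 1).getD ""
      let bits := ((PySem.List.pyGet? p 2).getD "").toList
      let st := bits.foldl (fun (s : List Char × List Char × List Char × List Char) bit =>
          let flip := if bit = '0' then '1' else '0'
          (s.1 ++ [bit], s.2.1 ++ [flip], bit :: s.2.2.1, flip :: s.2.2.2))
        (['1'], ['1'], ['1'], ['1'])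
      exponents ++ [[p0, p1, String.ofList st.1], [p0, p1, String.ofList st.2.1],
                    [p0, p1, String.ofList st.2.2.1], [p0, p1, String.ofList st.2.2.2]]) acc := by
  induction l generalizing acc with
  | nil => rfl
  | cons h t ih =>
      rw [List.foldl_cons, List.foldl_cons, ← ih]
      simp [fused_pass_eq]

-- ===== VERDICT (by name: the statement is the Claim_ definition above) =====
theorem create_exponents_spec : Claim_equal_create_exponents := by
  intro pe _ _
  unfold Spec_create_exponents create_exponents create_exponents_alt
  exact create_exponents_blocks_eq pe []
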